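-- pv_equiv track=rewrite | github.com/Fernando-JAL/Neurociencias-2025-1 | S_04_Examenes/Parcial_1er_solucion.py | recorte_de_bastones
-- ===== SOURCE A (Python) =====
-- def recorte_de_bastones(bastones: list) -> list:
--     bastones_recortados = []
--     while len(bastones) > 0:
--         bastones_recortados.append(len(bastones))
--         aux = []
--         for baston in bastones:
--             if baston != min(bastones):
--                 aux.append(baston)
--         bastones = aux
--
--     return bastones_recortados
-- ===== SOURCE B (Python) =====
-- def recorte_de_bastones(bastones: list) -> list:
--     s = sorted(bastones)
--     res = []
--     while s:
--         res.append(len(s))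
--         v = s[0]
--         k = 0
--         while k < len(s) and s[k] == v:
--             k += 1
--         s = s[k:]
--     return res
-- ===== Notes on version B (the rewrite author's own statement) =====
-- stated objective: faster
-- what changed: Instead of repeatedly recomputing the minimum and rebuilding the list each round, B sorts once and scans runs of equal values, emitting the remaining suffix length at each new value.
import Mathlib
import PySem

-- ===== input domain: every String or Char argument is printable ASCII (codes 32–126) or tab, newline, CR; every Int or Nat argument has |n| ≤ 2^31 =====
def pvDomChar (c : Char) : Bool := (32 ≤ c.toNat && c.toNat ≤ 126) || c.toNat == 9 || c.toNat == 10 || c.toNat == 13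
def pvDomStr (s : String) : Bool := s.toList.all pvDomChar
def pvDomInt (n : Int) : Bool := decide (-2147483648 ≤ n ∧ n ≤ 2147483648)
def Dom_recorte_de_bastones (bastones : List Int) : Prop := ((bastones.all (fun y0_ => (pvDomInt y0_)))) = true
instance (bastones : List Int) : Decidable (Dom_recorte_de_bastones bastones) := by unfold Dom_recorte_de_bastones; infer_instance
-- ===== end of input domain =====

-- B sorts once and scans runs of equal values instead of A's repeated min + rebuild (objective: faster).

-- ===== PORT A =====
-- one round of A's inner for-loop: keep every baston different from the minimum m
def pvAuxA (m : Int) (bastones : List Int) : List Int :=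
  bastones.foldl (fun aux baston => if baston != m then aux ++ [baston] else aux) []

-- termination helper for port A's while loop: removing all copies of the minimum shortens the list
theorem pvAuxALt (l : List Int) (m : Int) (hm : PySem.List.min? l (fun x => x) = some m) :
    (pvAuxA m l).length < l.length := by
  unfold pvAuxA
  rw [PySem.List.foldl_append_if]
  simp only [List.nil_append, List.map_id_fun', id]
  have hmem : m ∈ l := PySem.List.min?_mem hm
  refine List.length_filter_lt_length_iff_exists.mpr ⟨m, hmem, by simp⟩

def recorte_de_bastones_go (bastones acc : List Int) : List Int :=
  if 0 < bastones.length then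
    match hm : PySem.List.min? bastones (fun x => x) with
    | none => acc  -- unreachable: the loop body runs only when bastones ≠ []
    | some m => recorte_de_bastones_go (pvAuxA m bastones) (acc ++ [(bastones.length : Int)])
  else acc
termination_by bastones.length
decreasing_by exact pvAuxALt bastones m hm

def recorte_de_bastones (bastones : List Int) : List Int :=
  recorte_de_bastones_go bastones []

-- ===== PORT B =====
-- inner while loop of B: length of the leading run of v
def pvRunLen (v : Int) : List Int → Nat
  | [] => 0
  | x :: xs => if x = v then pvRunLen v xs + 1 else 0

def recorte_de_bastones_alt_go (s acc : List Int) : List Int :=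
  match s with
  | [] => acc
  | v :: rest =>
      recorte_de_bastones_alt_go ((v :: rest).drop (pvRunLen v (v :: rest)))
        (acc ++ [((v :: rest).length : Int)])
termination_by s.length
decreasing_by simp [pvRunLen]

def recorte_de_bastones_alt (bastones : List Int) : List Int :=
  recorte_de_bastones_alt_go (PySem.List.sorted bastones (fun x => x) false) []

-- ===== PRECONDITION & SPEC =====
def Spec_recorte_de_bastones (bastones : List Int) (out : List Int) : Prop := out = recorte_de_bastones_alt bastones
instance (bastones : List Int) (out : List Int) : Decidable (Spec_recorte_de_bastones bastones out) := by unfold Spec_recorte_de_bastones; infer_instance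

-- ===== CLAIM (what is proved, stated in full; the proofs are below) =====
def Claim_equal_recorte_de_bastones : Prop := ∀ (bastones : List Int), Dom_recorte_de_bastones bastones → Spec_recorte_de_bastones bastones (recorte_de_bastones bastones)

-- ===== LEMMAS AND PROOFS =====

-- A's round produces the filtered list
theorem pvAuxA_eq_filter (m : Int) (l : List Int) : pvAuxA m l = l.filter (fun x => x != m) := by
  unfold pvAuxA
  rw [PySem.List.foldl_append_if]
  simp

-- dropping the leading run of the minimum of a sorted list is filtering the minimum out
theorem pvDropRun (m : Int) (s : List Int) (hs : s.Pairwise (· ≤ ·)) (hmin : ∀ x ∈ s, m ≤ x) :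
    s.drop (pvRunLen m s) = s.filter (fun x => x != m) := by
  induction s with
  | nil => rfl
  | cons x xs ih =>
      by_cases hx : x = m
      · subst hx
        simp only [pvRunLen, List.filter_cons, bne_self_eq_false,
          Bool.false_eq_true, if_false, if_pos]
        exact ih hs.tail (fun y hy => hmin y (List.mem_cons_of_mem _ hy))
      · have h0 : pvRunLen m (x :: xs) = 0 := by simp [pvRunLen, hx]
        rw [h0, List.drop_zero]
        have hlt : m < x := lt_of_le_of_ne (hmin x (by simp)) (fun h => hx h.symm)
        rw [List.filter_eq_self.mpr]
        intro y hy
        rcases List.mem_cons.mp hy with h | h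
        · simp [h]; omega
        · have := (List.pairwise_cons.mp hs).1 y h
          simp; omega

-- main loop correspondence, by strong induction on the length
theorem pvGoEq (n : Nat) : ∀ l acc : List Int, l.length ≤ n →
    recorte_de_bastones_go l acc =
      recorte_de_bastones_alt_go (PySem.List.sorted l (fun x => x) false) acc := by
  induction n with
  | zero =>
      intro l acc hl
      have hnil : l = [] := List.eq_nil_of_length_eq_zero (Nat.le_zero.mp hl)
      subst hnil
      rw [(PySem.List.sorted_eq_nil_iff [] _ false).mpr rfl]
      simp [recorte_de_bastones_go, recorte_de_bastones_alt_go]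
  | succ n ih =>
      intro l acc hl
      by_cases hlne : l = []
      · subst hlne
        rw [(PySem.List.sorted_eq_nil_iff [] _ false).mpr rfl]
        simp [recorte_de_bastones_go, recorte_de_bastones_alt_go]
      · have hlen : 0 < l.length := List.length_pos_of_ne_nil hlne
        obtain ⟨m, hm⟩ : ∃ m, PySem.List.min? l (fun x => x) = some m := by
          cases h : PySem.List.min? l (fun x => x) with
          | none => exact absurd ((PySem.List.min?_eq_none_iff l _).mp h) hlne
          | some m => exact ⟨m, rfl⟩
        -- unfold A's step
        rw [recorte_de_bastones_go.eq_def, if_pos hlen, hm]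
        -- sorted l is nonempty, with head m
        set s := PySem.List.sorted l (fun x => x) false with hsdef
        have hperm : s.Perm l := PySem.List.sorted_perm l _ _
        obtain ⟨v, rest, hvr⟩ : ∃ v rest, s = v :: rest := by
          cases h : s with
          | nil => exact absurd ((PySem.List.sorted_eq_nil_iff l _ false).mp (hsdef ▸ h)) hlne
          | cons v rest => exact ⟨v, rest, rfl⟩
        have hvm : v = m := by
          have h1 : ∀ y ∈ l, v ≤ y := by
            have := PySem.List.key_head_sorted_le l (fun x => x) (hsdef ▸ hvr)
            simpa using this
          have h2 : ∀ y ∈ l, m ≤ y := by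
            have := PySem.List.min?_isMin hm
            simpa using this
          have hv : v ∈ l := hperm.mem_iff.mp (hvr ▸ List.mem_cons_self ..)
          exact le_antisymm (h1 m (PySem.List.min?_mem hm)) (h2 v hv)
        rw [hvm] at hvr
        have hpw : s.Pairwise (· ≤ ·) := by
          have := PySem.List.sorted_pairwise l (fun x => x)
          simpa using this
        have hminall : ∀ x ∈ s, m ≤ x := by
          intro x hx
          have := PySem.List.min?_isMin hm x (hperm.mem_iff.mp hx)
          simpa using this
        -- unfold B's step
        rw [hvr, recorte_de_bastones_alt_go.eq_def]
        simp only []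
        have hlen_eq : (m :: rest).length = l.length := by
          rw [← hvr]; exact hperm.length_eq
        -- the dropped suffix is sorted(filtered l)
        have hdrop : (m :: rest).drop (pvRunLen m (m :: rest))
            = PySem.List.sorted (l.filter (fun x => x != m)) (fun x => x) false := by
          rw [← hvr, pvDropRun m s hpw hminall]
          refine (PySem.List.sorted_id_eq_of_perm_of_pairwise _ _ ?_ ?_).symm
          · exact hperm.filter _
          · exact hpw.filter _
        rw [hlen_eq, pvAuxA_eq_filter, hdrop]
        have hflt : (l.filter (fun x => x != m)).length ≤ n := by
          have hlt : (l.filter (fun x => x != m)).length < l.length :=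
            List.length_filter_lt_length_iff_exists.mpr ⟨m, PySem.List.min?_mem hm, by simp⟩
          omega
        exact ih _ _ hflt

-- ===== VERDICT (by name: the statement is the Claim_ definition above) =====
theorem recorte_de_bastones_spec : Claim_equal_recorte_de_bastones := by
  intro l _
  unfold Spec_recorte_de_bastones recorte_de_bastones recorte_de_bastones_alt
  exact pvGoEq l.length l [] le_rfl
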